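-- pv_equiv track=rewrite | github.com/Csuarezgurruchaga/artuso-chatbot | chatbot/rules.py | _is_single_transposition
-- ===== SOURCE A (Python) =====
-- def _is_single_transposition(a: str, b: str) -> bool:
--     if len(a) != len(b) or a == b:
--         return False
--     diffs = [i for i, (ca, cb) in enumerate(zip(a, b)) if ca != cb]
--     if len(diffs) != 2:
--         return False
--     i, j = diffs
--     if j != i + 1:
--         return False
--     a_list = list(a)
--     a_list[i], a_list[j] = a_list[j], a_list[i]
--     return "".join(a_list) == b
-- ===== SOURCE B (Python) =====
-- def _is_single_transposition(a: str, b: str) -> bool: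
--     if len(a) != len(b):
--         return False
--     n = len(a)
--     for i in range(n):
--         if a[i] != b[i]:
--             return (i + 1 < n and a[i] == b[i + 1]
--                     and a[i + 1] == b[i] and a[i + 2:] == b[i + 2:])
--     return False
-- ===== Notes on version B (the rewrite author's own statement) =====
-- stated objective: faster
-- what changed: Replaces A's build-the-full-list-of-differing-indices plus list-swap-and-rejoin reconstruction with a single early-exit scan: at the first mismatch it directly checks the adjacent transposition and that the remaining suffixes are equal.
import Mathlib
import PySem

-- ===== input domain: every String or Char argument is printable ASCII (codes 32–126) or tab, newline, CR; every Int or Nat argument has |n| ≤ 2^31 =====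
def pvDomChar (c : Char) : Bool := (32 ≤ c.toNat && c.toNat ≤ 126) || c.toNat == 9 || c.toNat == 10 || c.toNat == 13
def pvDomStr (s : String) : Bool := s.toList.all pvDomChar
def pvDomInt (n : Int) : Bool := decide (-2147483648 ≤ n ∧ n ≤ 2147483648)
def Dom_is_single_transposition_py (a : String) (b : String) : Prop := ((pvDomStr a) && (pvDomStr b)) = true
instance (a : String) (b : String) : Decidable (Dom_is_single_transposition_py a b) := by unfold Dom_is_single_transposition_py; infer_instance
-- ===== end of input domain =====

-- B replaces A's full list of differing indices + swap-and-rejoin with a single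
-- early-exit scan that checks the adjacent transposition at the first mismatch (simpler).


-- ===== PORT A =====
def is_single_transposition_py (a : String) (b : String) : Bool :=
  let la := a.toList
  let lb := b.toList
  if la.length ≠ lb.length || a == b then false
  else
    let diffs := ((PySem.List.enumerate (la.zip lb)).filter (fun p => p.2.1 != p.2.2)).map Prod.fst
    match diffs with
    | [i, j] =>
      if j != i + 1 then false
      else
        -- a_list[i], a_list[j] = a_list[j], a_list[i]; "".join(a_list) == b
        let ci := (PySem.List.pyGet? la i).getD ' '
        let cj := (PySem.List.pyGet? la j).getD ' '
        (PySem.List.pySetD (PySem.List.pySetD la i cj) j ci) == lb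
    | _ => false

-- ===== PORT B =====
-- the for-loop of Source B as structural recursion: stop at the first mismatch,
-- there check the adjacent transposition and that the suffixes agree
def altGo : List Char → List Char → Bool
  | [], [] => false
  | [], _ :: _ => false
  | _ :: _, [] => false
  | x :: xs, y :: ys =>
    if x == y then altGo xs ys
    else
      match xs, ys with
      | [], [] => false
      | [], _ :: _ => false
      | _ :: _, [] => false
      | x2 :: xs2, y2 :: ys2 => x == y2 && x2 == y && xs2 == ys2

def is_single_transposition_py_alt (a : String) (b : String) : Bool :=
  if a.toList.length ≠ b.toList.length then false
  else altGo a.toList b.toList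

-- ===== PRECONDITION & SPEC =====
def Spec_is_single_transposition_py (a : String) (b : String) (out : Bool) : Prop := out = is_single_transposition_py_alt a b
instance (a : String) (b : String) (out : Bool) : Decidable (Spec_is_single_transposition_py a b out) := by unfold Spec_is_single_transposition_py; infer_instance

-- ===== CLAIM (what is proved, stated in full; the proofs are below) =====
def Claim_equal_is_single_transposition_py : Prop := ∀ (a : String) (b : String), Dom_is_single_transposition_py a b → Spec_is_single_transposition_py a b (is_single_transposition_py a b)

-- ===== LEMMAS AND PROOFS =====

-- the list of differing indices, as a Nat-valued recursion
def diffsN : List (Char × Char) → Nat → List Nat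
  | [], _ => []
  | (x, y) :: r, s => if x != y then s :: diffsN r (s + 1) else diffsN r (s + 1)

-- A's match on the diffs list, over Nat indices
def AcoreN (d : List Nat) (l1 l2 : List Char) : Bool :=
  match d with
  | [m, k] =>
    if k ≠ m + 1 then false
    else ((l1.set m (l1.getD k ' ')).set k (l1.getD m ' ') == l2)
  | _ => false

lemma diffsN_shift (ps : List (Char × Char)) (s : Nat) :
    diffsN ps (s + 1) = (diffsN ps s).map (· + 1) := by
  induction ps generalizing s with
  | nil => simp [diffsN]
  | cons p r ih =>
    obtain ⟨x, y⟩ := p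
    by_cases h : x = y <;> simp [diffsN, h, ih]

lemma diffsN_cons_ne (x y : Char) (r : List (Char × Char)) (h : x ≠ y) :
    diffsN ((x, y) :: r) 0 = 0 :: (diffsN r 0).map (· + 1) := by
  simp only [diffsN]
  rw [if_pos (by simpa using h)]
  exact congrArg _ (diffsN_shift r 0)

lemma diffsN_cons_eq (x : Char) (r : List (Char × Char)) :
    diffsN ((x, x) :: r) 0 = (diffsN r 0).map (· + 1) := by
  simp only [diffsN]
  rw [if_neg (by simp)]
  exact diffsN_shift r 0

lemma diffs_eq (ps : List (Char × Char)) (s : Nat) :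
    ((PySem.List.enumerate ps (s : Int)).filter (fun p => p.2.1 != p.2.2)).map Prod.fst
      = (diffsN ps s).map (fun n => (n : Int)) := by
  induction ps generalizing s with
  | nil => simp [diffsN, PySem.List.enumerate_nil]
  | cons p r ih =>
    obtain ⟨x, y⟩ := p
    have ih' : ((PySem.List.enumerate r ((s : Int) + 1)).filter
          (fun p => p.2.1 != p.2.2)).map Prod.fst
        = (diffsN r (s + 1)).map (fun n => (n : Int)) := by
      rw [show (s : Int) + 1 = ((s + 1 : Nat) : Int) from by push_cast; ring]
      exact ih (s + 1)
    rw [PySem.List.enumerate_cons, List.filter_cons]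
    by_cases h : x = y
    · rw [if_neg (by simp [h]), ih']
      simp [diffsN, h]
    · rw [if_pos (by simp [h]), List.map_cons, ih']
      simp [diffsN, h]

lemma diffsN_nil_iff (l1 l2 : List Char) (h : l1.length = l2.length) (s : Nat) :
    diffsN (l1.zip l2) s = [] ↔ l1 = l2 := by
  induction l1 generalizing l2 s with
  | nil => cases l2 with
    | nil => simp [diffsN]
    | cons y ys => simp at h
  | cons x xs ih =>
    cases l2 with
    | nil => simp at h
    | cons y ys =>
      simp only [List.length_cons, Nat.add_right_cancel_iff] at h
      by_cases hxy : x = y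
      · simp [diffsN, hxy, ih ys h (s + 1)]
      · simp [diffsN, hxy]

lemma AcoreN_shift (d : List Nat) (c : Char) (l1 l2 : List Char) :
    AcoreN (d.map (· + 1)) (c :: l1) (c :: l2) = AcoreN d l1 l2 := by
  match d with
  | [] => rfl
  | [m] => rfl
  | [m, k] =>
    by_cases h : k = m + 1
    · simp [AcoreN, h]
    · simp [AcoreN]
  | m :: k :: r :: t => rfl

lemma altGo_cons_self (c : Char) (xs ys : List Char) :
    altGo (c :: xs) (c :: ys) = altGo xs ys := by
  simp [altGo]

lemma main_eq (l1 l2 : List Char) (h : l1.length = l2.length) :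
    AcoreN (diffsN (l1.zip l2) 0) l1 l2 = altGo l1 l2 := by
  induction l1 generalizing l2 with
  | nil =>
    cases l2 with
    | nil => rfl
    | cons y ys => simp at h
  | cons x xs ih =>
    cases l2 with
    | nil => simp at h
    | cons y ys =>
      simp only [List.length_cons, Nat.add_right_cancel_iff] at h
      rw [show (x :: xs).zip (y :: ys) = (x, y) :: xs.zip ys from rfl]
      by_cases hxy : x = y
      · -- equal heads: both sides recurse
        subst hxy
        rw [diffsN_cons_eq, AcoreN_shift, altGo_cons_self]
        exact ih ys h
      · -- first mismatch at the head
        rw [diffsN_cons_ne x y _ hxy]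
        cases xs with
        | nil =>
          cases ys with
          | nil => simp [altGo, AcoreN, hxy, diffsN]
          | cons y2 ys2 => simp at h
        | cons x2 xs2 =>
          cases ys with
          | nil => simp at h
          | cons y2 ys2 =>
            simp only [List.length_cons, Nat.add_right_cancel_iff] at h
            have hAlt : altGo (x :: x2 :: xs2) (y :: y2 :: ys2)
                = (x == y2 && (x2 == y && xs2 == ys2)) := by
              simp [altGo, hxy, Bool.and_assoc]
            rw [hAlt,
              show (x2 :: xs2).zip (y2 :: ys2) = (x2, y2) :: xs2.zip ys2 from rfl]
            by_cases h2 : x2 = y2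
            · -- second chars agree: both sides false
              subst h2
              rw [diffsN_cons_eq]
              have hrhs : (x == x2 && (x2 == y && xs2 == ys2)) = false := by
                by_cases hx : x = x2
                · by_cases hy : x2 = y
                  · exact absurd (hx.trans hy) hxy
                  · simp [hy]
                · simp [hx]
              rw [hrhs]
              cases hE : diffsN (xs2.zip ys2) 0 with
              | nil => rfl
              | cons e r =>
                cases r with
                | nil => simp [AcoreN]
                | cons f t => rfl
            · -- adjacent mismatch: check the transposition
              rw [diffsN_cons_ne x2 y2 _ h2]
              cases hE : diffsN (xs2.zip ys2) 0 with
              | nil =>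
                -- suffixes agree
                have hsfx : xs2 = ys2 := (diffsN_nil_iff xs2 ys2 h 0).1 hE
                subst hsfx
                show AcoreN [0, 1] (x :: x2 :: xs2) (y :: y2 :: xs2) = _
                simp only [AcoreN, List.getD, List.set]
                rw [if_neg (by omega)]
                simp only [List.getElem?_cons_zero, List.getElem?_cons_succ,
                  Option.getD_some, List.cons_beq_cons, beq_self_eq_true, Bool.and_true]
                cases hb1 : (x == y2) <;> cases hb2 : (x2 == y) <;> simp
              | cons e r =>
                -- a further mismatch: suffixes differ, both sides false
                have hsfx : (xs2 == ys2) = false := by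
                  apply beq_eq_false_iff_ne.2
                  intro hq
                  rw [(diffsN_nil_iff xs2 ys2 h 0).2 hq] at hE
                  simp at hE
                rw [hsfx]
                simp only [Bool.and_false]
                simp [AcoreN]

lemma port_A_core (la lb : List Char) :
    (match ((PySem.List.enumerate (la.zip lb)).filter (fun p => p.2.1 != p.2.2)).map Prod.fst with
      | [i, j] =>
        if j != i + 1 then false
        else
          (PySem.List.pySetD (PySem.List.pySetD la i ((PySem.List.pyGet? la j).getD ' '))
              j ((PySem.List.pyGet? la i).getD ' ')) == lb
      | _ => false)
      = AcoreN (diffsN (la.zip lb) 0) la lb := by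
  have h0 : ((0 : Nat) : Int) = (0 : Int) := rfl
  rw [← h0, diffs_eq]
  cases hd : diffsN (la.zip lb) 0 with
  | nil => rfl
  | cons m r =>
    cases r with
    | nil => rfl
    | cons k t =>
      cases t with
      | nil =>
        by_cases hk : k = m + 1
        · subst hk
          simp [AcoreN, PySem.List.pyGet?_natCast, PySem.List.pySetD_natCast, List.getD]
          rw [show (m : Int) + 1 = ((m + 1 : Nat) : Int) from by push_cast; ring,
            PySem.List.pySetD_natCast, PySem.List.pyGet?_natCast]
        · have : ((k : Int) != (m : Int) + 1) = true := by
            simp; omega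
          simp [AcoreN, this, hk]
      | cons u v => rfl

-- ===== VERDICT (by name: the statement is the Claim_ definition above) =====
theorem is_single_transposition_py_spec : Claim_equal_is_single_transposition_py := by
  intro a b _
  unfold Spec_is_single_transposition_py
  have hB : is_single_transposition_py_alt a b
      = if a.toList.length = b.toList.length then altGo a.toList b.toList else false := by
    unfold is_single_transposition_py_alt
    by_cases hlen : a.toList.length = b.toList.length <;> simp [hlen]
  rw [hB]
  unfold is_single_transposition_py
  by_cases hlen : a.toList.length = b.toList.length
  · rw [if_pos hlen]
    by_cases hab : a = b
    · subst hab
      rw [if_pos (by simp)]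
      rw [← main_eq a.toList a.toList rfl,
        (diffsN_nil_iff a.toList a.toList rfl 0).2 rfl]
      rfl
    · rw [if_neg (by simp [hlen, hab])]
      rw [port_A_core, main_eq a.toList b.toList hlen]
  · rw [if_neg hlen, if_pos (by simp; exact Or.inl (by simpa using hlen))]
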